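-- pv_equiv track=rewrite | github.com/PrinceSinghhub/InterviewBit-Tree-Data-Structure | Interview Bit BST/Xor Between Two Arrays!.py | solve
-- ===== SOURCE A (Python) =====
-- def solve(A, B):
--     bigA = bigB = 0
--     maxA = sorted(A)[-100:]
--     maxB = sorted(B)[-100:]
--
--     for v in A:
--         for mb in maxB:
--             bigA = max(bigA, v ^ mb)
--     for v in B:
--         for ma in maxA:
--             bigB = max(bigB, v ^ ma)
--
--     return max(bigA, bigB)
-- ===== SOURCE B (Python) =====
-- MASK = (1 << 33) - 1   # low 33 bits: covers two's-complement of every |x| <= 2**31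
-- OFF = 1 << 32          # sign-flip bit so unsigned trie order == signed order
--
--
-- def _insert(root, x):
--     node = root
--     u = x & MASK
--     for i in range(32, -1, -1):
--         b = (u >> i) & 1
--         if node[b] is None:
--             node[b] = [None, None]
--         node = node[b]
--
--
-- def _query(root, x):
--     q = (x & MASK) ^ OFF
--     node = root
--     r = 0
--     for i in range(32, -1, -1):
--         d = 1 - ((q >> i) & 1)
--         if node[d] is not None:
--             r |= 1 << i
--             node = node[d]
--         else:
--             node = node[1 - d]
--     return r - OFF
--
--
-- def solve(A, B):
--     best = 0
--     for tops, others in ((sorted(B)[-100:], A), (sorted(A)[-100:], B)):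
--         if tops:
--             root = [None, None]
--             for x in tops:
--                 _insert(root, x)
--             for v in others:
--                 best = max(best, _query(root, v))
--     return best
-- ===== Notes on version B (the rewrite author's own statement) =====
-- stated objective: faster
-- what changed: Replaces the 100-wide inner scan over the other array's top-100 with a 33-level binary max-XOR trie (keys are the low 33 two's-complement bits with the sign bit flipped so the greedy unsigned walk maximises the signed XOR), queried once per element.
import Mathlib
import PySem

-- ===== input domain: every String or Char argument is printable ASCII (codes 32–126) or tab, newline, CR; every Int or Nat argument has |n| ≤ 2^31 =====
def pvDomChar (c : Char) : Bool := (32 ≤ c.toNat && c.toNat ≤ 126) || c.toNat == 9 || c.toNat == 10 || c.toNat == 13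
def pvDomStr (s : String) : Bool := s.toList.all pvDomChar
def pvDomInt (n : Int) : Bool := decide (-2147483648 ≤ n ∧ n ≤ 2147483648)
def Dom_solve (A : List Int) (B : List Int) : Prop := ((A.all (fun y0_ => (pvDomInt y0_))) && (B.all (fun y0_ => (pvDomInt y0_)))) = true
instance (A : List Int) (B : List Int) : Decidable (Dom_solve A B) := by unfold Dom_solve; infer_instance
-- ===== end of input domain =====

-- B replaces the quadratic-in-100 inner scan by a 33-level binary max-XOR trie
-- over the top-100 list, queried once per element of the other array (faster by
-- the measured constant factor; return value identical).

-- ===== PORT A =====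
def solve (A : List Int) (B : List Int) : Int :=
  -- maxA = sorted(A)[-100:], maxB = sorted(B)[-100:]
  let maxA := PySem.List.slice (PySem.List.sorted A (fun x => x)) (some (-100)) none
  let maxB := PySem.List.slice (PySem.List.sorted B (fun x => x)) (some (-100)) none
  let bigA := A.foldl (fun big v => maxB.foldl (fun big mb => max big (PySem.Int.bxor v mb)) big) 0
  let bigB := B.foldl (fun big v => maxA.foldl (fun big ma => max big (PySem.Int.bxor v ma)) big) 0
  max bigA bigB

-- ===== PORT B =====
-- binary trie node; `empty` is Python's None child, `node l r` is [l, r]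
inductive PTrie where
  | empty : PTrie
  | node : PTrie → PTrie → PTrie
deriving DecidableEq

def PTrie.left : PTrie → PTrie
  | .empty => .empty
  | .node l _ => l

def PTrie.right : PTrie → PTrie
  | .empty => .empty
  | .node _ r => r

def PTrie.isNode : PTrie → Bool
  | .empty => false
  | .node _ _ => true

-- Source B _insert: walk bits i-1, i-2, …, 0 of u, creating children (i = bits left)
def insertAux (t : PTrie) (u : Nat) : Nat → PTrie
  | 0 => .node t.left t.right
  | i + 1 =>
      if u.testBit i then .node t.left (insertAux t.right u i)
      else .node (insertAux t.left u i) t.right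

-- Source B _query: greedy walk preferring the complementary bit, r |= 1 << i on a hit
def queryAux (t : PTrie) (q : Nat) : Nat → Nat
  | 0 => 0
  | i + 1 =>
      let d := !q.testBit i
      let c := if d then t.right else t.left
      if c.isNode then 2 ^ i + queryAux c q i
      else queryAux (if d then t.left else t.right) q i

-- x & MASK (Python-exact on negatives), kept as a Nat for the bit walk
def pkey (x : Int) : Nat := (PySem.Int.band x 8589934591).toNat

def buildTrie (xs : List Int) : PTrie :=
  xs.foldl (fun t x => insertAux t (pkey x) 33) .empty

-- Source B _query(root, x): q = (x & MASK) ^ OFF, greedy walk, result r - OFF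
def tquery (t : PTrie) (x : Int) : Int :=
  ((queryAux t (pkey x ^^^ 4294967296) 33 : Nat) : Int) - 4294967296

def solve_alt (A : List Int) (B : List Int) : Int :=
  let topA := PySem.List.slice (PySem.List.sorted A (fun x => x)) (some (-100)) none
  let topB := PySem.List.slice (PySem.List.sorted B (fun x => x)) (some (-100)) none
  let b1 := if topB.isEmpty then 0 else
    (let t := buildTrie topB; A.foldl (fun best v => max best (tquery t v)) 0)
  if topA.isEmpty then b1 else
    (let t := buildTrie topA; B.foldl (fun best v => max best (tquery t v)) b1)

-- ===== PRECONDITION & SPEC =====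
def Spec_solve (A : List Int) (B : List Int) (out : Int) : Prop := out = solve_alt A B
instance (A : List Int) (B : List Int) (out : Int) : Decidable (Spec_solve A B out) := by unfold Spec_solve; infer_instance

-- ===== CLAIM (what is proved, stated in full; the proofs are below) =====
def Claim_equal_solve : Prop := ∀ (A : List Int) (B : List Int), Dom_solve A B → Spec_solve A B (solve A B)

-- ===== LEMMAS AND PROOFS =====

-- bits j < i of u and w agree
def eqB (i u w : Nat) : Prop := ∀ j, j < i → u.testBit j = w.testBit j

-- xor value of the low i bits
def xv : Nat → Nat → Nat → Nat
  | 0, _, _ => 0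
  | i + 1, q, w => (if q.testBit i != w.testBit i then 2 ^ i else 0) + xv i q w

-- structural well-formedness: below the root, every node has a node child
def wf : Nat → PTrie → Prop
  | _, .empty => True
  | 0, .node _ _ => True
  | i + 1, .node l r => (l.isNode || r.isNode) = true ∧ wf i l ∧ wf i r

-- w is stored in t (reading bits i-1 … 0 of w)
def memAux : PTrie → Nat → Nat → Prop
  | t, _, 0 => t.isNode = true
  | t, w, i + 1 => memAux (if w.testBit i then t.right else t.left) w i

theorem insertAux_isNode (t : PTrie) (u i : Nat) : (insertAux t u i).isNode = true := by
  cases i with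
  | zero => rfl
  | succ i => simp only [insertAux]; split <;> rfl

theorem wf_empty (i : Nat) : wf i PTrie.empty := by
  cases i <;> trivial

theorem wf_children {t : PTrie} {i : Nat} (h : wf (i+1) t) : wf i t.left ∧ wf i t.right := by
  cases t with
  | empty => exact ⟨wf_empty i, wf_empty i⟩
  | node l r => exact ⟨h.2.1, h.2.2⟩

theorem wf_insertAux (t : PTrie) (u : Nat) (i : Nat) (h : wf i t) : wf i (insertAux t u i) := by
  induction i generalizing t with
  | zero => trivial
  | succ i ih =>
      have hc := wf_children h
      simp only [insertAux]
      split
      · exact ⟨by simp [insertAux_isNode], hc.1, ih t.right hc.2⟩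
      · exact ⟨by simp [insertAux_isNode], ih t.left hc.1, hc.2⟩

theorem not_memAux_empty (w i : Nat) : ¬ memAux PTrie.empty w i := by
  induction i with
  | zero => simp [memAux, PTrie.isNode]
  | succ i ih => simp only [memAux, PTrie.left, PTrie.right]; split <;> exact ih

theorem isNode_of_memAux (t : PTrie) (w i : Nat) (h : memAux t w i) : t.isNode = true := by
  cases t with
  | empty => exact absurd h (not_memAux_empty w i)
  | node l r => rfl

theorem memAux_insertAux (t : PTrie) (u w i : Nat) :
    memAux (insertAux t u i) w i ↔ (memAux t w i ∨ eqB i u w) := by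
  induction i generalizing t with
  | zero => simp [memAux, insertAux, PTrie.isNode, eqB]
  | succ i ih =>
      have heqB : u.testBit i = w.testBit i → (eqB (i+1) u w ↔ eqB i u w) := by
        intro h
        constructor
        · intro he j hj; exact he j (Nat.lt_succ_of_lt hj)
        · intro he j hj
          rcases Nat.lt_succ_iff_lt_or_eq.1 hj with hj | rfl
          · exact he j hj
          · exact h
      have hneB : u.testBit i ≠ w.testBit i → ¬ eqB (i+1) u w := by
        intro h he; exact h (he i (Nat.lt_succ_self i))
      simp only [insertAux, memAux]
      rcases Bool.eq_false_or_eq_true (u.testBit i) with hu | hu <;>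
        rcases Bool.eq_false_or_eq_true (w.testBit i) with hw | hw <;>
        simp only [hu, hw, if_true, if_false, Bool.false_eq_true,
          PTrie.left, PTrie.right]
      · rw [ih, heqB (by rw [hu, hw])]
      · have := hneB (by rw [hu, hw]; simp)
        simp [this]
      · have := hneB (by rw [hu, hw]; simp)
        simp [this]
      · rw [ih, heqB (by rw [hu, hw])]

theorem memAux_congr (t : PTrie) (u w i : Nat) (h : eqB i u w) :
    memAux t u i ↔ memAux t w i := by
  induction i generalizing t with
  | zero => simp [memAux]
  | succ i ih =>
      simp only [memAux, h i (Nat.lt_succ_self i)]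
      exact ih _ (fun j hj => h j (Nat.lt_succ_of_lt hj))

theorem xv_congr (i q u w : Nat) (h : eqB i u w) : xv i q u = xv i q w := by
  induction i with
  | zero => rfl
  | succ i ih =>
      simp only [xv, h i (Nat.lt_succ_self i)]
      rw [ih (fun j hj => h j (Nat.lt_succ_of_lt hj))]

theorem xv_lt (i q w : Nat) : xv i q w < 2 ^ i := by
  induction i with
  | zero => simp [xv]
  | succ i ih =>
      have : 2 ^ (i + 1) = 2 ^ i + 2 ^ i := by ring
      simp only [xv, this]
      split <;> omega

theorem lowpart0_top (w i : Nat) : (w % 2 ^ i).testBit i = false := by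
  simp [Nat.testBit_mod_two_pow]

theorem lowpart0_low (w i j : Nat) (hj : j < i) : (w % 2 ^ i).testBit j = w.testBit j := by
  simp [Nat.testBit_mod_two_pow, hj]

theorem lowpart1_top (w i : Nat) : (w % 2 ^ i + 2 ^ i).testBit i = true := by
  rw [Nat.add_comm, Nat.testBit_two_pow_add_eq]
  simp [Nat.testBit_mod_two_pow]

theorem lowpart1_low (w i j : Nat) (hj : j < i) : (w % 2 ^ i + 2 ^ i).testBit j = w.testBit j := by
  rw [Nat.add_comm, Nat.testBit_two_pow_add_gt hj]
  simp [Nat.testBit_mod_two_pow, hj]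

theorem queryAux_achieved (i : Nat) (t : PTrie) (q : Nat) (hwf : wf i t) (hn : t.isNode = true) :
    ∃ w, memAux t w i ∧ queryAux t q i = xv i q w := by
  induction i generalizing t with
  | zero => exact ⟨0, hn, rfl⟩
  | succ i ih =>
      cases t with
      | empty => simp [PTrie.isNode] at hn
      | node l r =>
        obtain ⟨hOr, hwl, hwr⟩ := hwf
        cases hq : q.testBit i
        · -- desired key bit is 1: prefer the right child
          by_cases hcn : r.isNode = true
          · obtain ⟨w, hm, he⟩ := ih r hwr hcn
            refine ⟨w % 2 ^ i + 2 ^ i, ?_, ?_⟩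
            · simp only [memAux, lowpart1_top, if_true, PTrie.right]
              rw [← memAux_congr r w _ i (fun j hj => (lowpart1_low w i j hj).symm)]
              exact hm
            · simp only [queryAux, hq, Bool.not_false, if_true, PTrie.right, hcn, xv,
                lowpart1_top]
              rw [he, xv_congr i q w _ (fun j hj => (lowpart1_low w i j hj).symm)]
              norm_num
          · have hln : l.isNode = true := by
              rw [Bool.not_eq_true] at hcn; simpa [hcn] using hOr
            obtain ⟨w, hm, he⟩ := ih l hwl hln
            refine ⟨w % 2 ^ i, ?_, ?_⟩
            · simp only [memAux, lowpart0_top, Bool.false_eq_true, if_false, PTrie.left]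
              rw [← memAux_congr l w _ i (fun j hj => (lowpart0_low w i j hj).symm)]
              exact hm
            · rw [Bool.not_eq_true] at hcn
              simp only [queryAux, hq, Bool.not_false, if_true, PTrie.right, PTrie.left, hcn,
                Bool.false_eq_true, if_false, xv, lowpart0_top]
              rw [he, xv_congr i q w _ (fun j hj => (lowpart0_low w i j hj).symm)]
              norm_num
        · -- desired key bit is 0: prefer the left child
          by_cases hcn : l.isNode = true
          · obtain ⟨w, hm, he⟩ := ih l hwl hcn
            refine ⟨w % 2 ^ i, ?_, ?_⟩
            · simp only [memAux, lowpart0_top, Bool.false_eq_true, if_false, PTrie.left]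
              rw [← memAux_congr l w _ i (fun j hj => (lowpart0_low w i j hj).symm)]
              exact hm
            · simp only [queryAux, hq, Bool.not_true, Bool.false_eq_true, if_false, PTrie.left,
                hcn, if_true, xv, lowpart0_top]
              rw [he, xv_congr i q w _ (fun j hj => (lowpart0_low w i j hj).symm)]
              norm_num
          · have hrn : r.isNode = true := by
              rw [Bool.not_eq_true] at hcn; simpa [hcn] using hOr
            obtain ⟨w, hm, he⟩ := ih r hwr hrn
            refine ⟨w % 2 ^ i + 2 ^ i, ?_, ?_⟩
            · simp only [memAux, lowpart1_top, if_true, PTrie.right]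
              rw [← memAux_congr r w _ i (fun j hj => (lowpart1_low w i j hj).symm)]
              exact hm
            · rw [Bool.not_eq_true] at hcn
              simp only [queryAux, hq, Bool.not_true, Bool.false_eq_true, if_false, PTrie.left,
                PTrie.right, hcn, xv, lowpart1_top]
              rw [he, xv_congr i q w _ (fun j hj => (lowpart1_low w i j hj).symm)]
              norm_num

theorem queryAux_opt (i : Nat) (t : PTrie) (q w : Nat) (hwf : wf i t) (hm : memAux t w i) :
    xv i q w ≤ queryAux t q i := by
  induction i generalizing t with
  | zero => simp [xv]
  | succ i ih =>
      cases t with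
      | empty => exact absurd hm (not_memAux_empty w (i+1))
      | node l r =>
        obtain ⟨hOr, hwl, hwr⟩ := hwf
        cases hq : q.testBit i <;> cases hw : w.testBit i <;>
          simp only [memAux, hw, if_true, if_false, Bool.false_eq_true, PTrie.left,
            PTrie.right] at hm <;>
          simp only [queryAux, xv, hq, hw, Bool.not_true, Bool.not_false, if_true, if_false,
            Bool.false_eq_true, bne_self_eq_false, Nat.zero_add, PTrie.left, PTrie.right]
        · -- q bit 0, w bit 0: preferred child is r, w lives in l
          split
          · have := xv_lt i q w; omega
          · exact ih l hwl hm
        · -- q bit 0, w bit 1: preferred child is r, w lives in r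
          have hcn : r.isNode = true := isNode_of_memAux _ _ _ hm
          rw [if_pos hcn]
          have := ih r hwr hm
          simp only [show (false != true) = true from rfl, if_true]
          omega
        · -- q bit 1, w bit 0: preferred child is l, w lives in l
          have hcn : l.isNode = true := isNode_of_memAux _ _ _ hm
          rw [if_pos hcn]
          have := ih l hwl hm
          simp only [show (true != false) = true from rfl, if_true]
          omega
        · -- q bit 1, w bit 1: preferred child is l, w lives in r
          split
          · have := xv_lt i q w; omega
          · exact ih r hwr hm

theorem wf_foldl (xs : List Int) (t : PTrie) (h : wf 33 t) :
    wf 33 (xs.foldl (fun t x => insertAux t (pkey x) 33) t) := by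
  induction xs generalizing t with
  | nil => exact h
  | cons x xs ih => exact ih _ (wf_insertAux t (pkey x) 33 h)

theorem wf_buildTrie (xs : List Int) : wf 33 (buildTrie xs) :=
  wf_foldl xs .empty (wf_empty 33)

theorem isNode_foldl (xs : List Int) (t : PTrie) (h : t.isNode = true) :
    (xs.foldl (fun t x => insertAux t (pkey x) 33) t).isNode = true := by
  induction xs generalizing t with
  | nil => exact h
  | cons x xs ih => exact ih _ (insertAux_isNode t (pkey x) 33)

theorem buildTrie_isNode (xs : List Int) (h : xs ≠ []) : (buildTrie xs).isNode = true := by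
  cases xs with
  | nil => exact absurd rfl h
  | cons x xs => exact isNode_foldl xs _ (insertAux_isNode _ _ 33)

theorem memAux_foldl (xs : List Int) (t : PTrie) (w : Nat) :
    memAux (xs.foldl (fun t x => insertAux t (pkey x) 33) t) w 33 ↔
      (memAux t w 33 ∨ ∃ x ∈ xs, eqB 33 (pkey x) w) := by
  induction xs generalizing t with
  | nil => simp
  | cons x xs ih =>
      simp only [List.foldl_cons, ih, memAux_insertAux, List.mem_cons]
      constructor
      · rintro ((h | h) | ⟨y, hy, he⟩)
        · exact Or.inl h
        · exact Or.inr ⟨x, Or.inl rfl, h⟩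
        · exact Or.inr ⟨y, Or.inr hy, he⟩
      · rintro (h | ⟨y, (rfl | hy), he⟩)
        · exact Or.inl (Or.inl h)
        · exact Or.inl (Or.inr he)
        · exact Or.inr ⟨y, hy, he⟩

theorem memAux_buildTrie (xs : List Int) (w : Nat) :
    memAux (buildTrie xs) w 33 ↔ ∃ x ∈ xs, eqB 33 (pkey x) w := by
  rw [buildTrie, memAux_foldl]
  simp [not_memAux_empty w 33]

-- xv of full-width numbers is xor
theorem mod_two_pow_succ (x i : Nat) :
    x % 2 ^ (i + 1) = (if x.testBit i then 2 ^ i else 0) + x % 2 ^ i := by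
  have h1 : x % 2 ^ (i + 1) = x % 2 ^ i + 2 ^ i * (x / 2 ^ i % 2) := by
    rw [pow_succ]; exact Nat.mod_mul
  have h2 : x.testBit i = decide (x / 2 ^ i % 2 = 1) := Nat.testBit_eq_decide_div_mod_eq
  rcases Nat.mod_two_eq_zero_or_one (x / 2 ^ i) with h | h
  · rw [h1, h2, h]; norm_num
  · rw [h1, h2, h]; norm_num; omega

theorem xv_mod (i q w : Nat) : xv i q w = (q ^^^ w) % 2 ^ i := by
  induction i with
  | zero => simp [xv, Nat.mod_one]
  | succ i ih =>
      rw [mod_two_pow_succ, Nat.testBit_xor]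
      simp only [xv, ih]

theorem xv_eq_xor (i q w : Nat) (hq : q < 2 ^ i) (hw : w < 2 ^ i) : xv i q w = q ^^^ w := by
  rw [xv_mod, Nat.mod_eq_of_lt (Nat.xor_lt_two_pow hq hw)]

-- Nat bit facts
theorem xor_two_pow_of_lt (w i : Nat) (h : w < 2 ^ i) : w ^^^ 2 ^ i = w + 2 ^ i := by
  apply Nat.eq_of_testBit_eq
  intro j
  rcases lt_trichotomy j i with hj | rfl | hj
  · rw [Nat.testBit_xor, Nat.testBit_two_pow, Nat.add_comm, Nat.testBit_two_pow_add_gt hj]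
    simp [Nat.ne_of_gt hj]
  · rw [Nat.testBit_xor, Nat.testBit_two_pow, Nat.add_comm, Nat.testBit_two_pow_add_eq,
      Nat.testBit_lt_two_pow h]
    simp
  · have hle : 2 ^ (i + 1) ≤ 2 ^ j := Nat.pow_le_pow_right (by norm_num) hj
    have hsum : 2 ^ i + 2 ^ i = 2 ^ (i + 1) := by ring
    have h1 : w + 2 ^ i < 2 ^ j := by omega
    have h2 : w ^^^ 2 ^ i < 2 ^ j := by
      have := Nat.xor_lt_two_pow (x := w) (y := 2 ^ i) (n := i + 1) (by omega) (by omega)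
      omega
    rw [Nat.testBit_lt_two_pow h1, Nat.testBit_lt_two_pow h2]

theorem xor_shuffle (a b c : Nat) : (a ^^^ b) ^^^ c = (a ^^^ c) ^^^ b := by ac_rfl

theorem xor_cancel (a b c : Nat) : (a ^^^ c) ^^^ (b ^^^ c) = a ^^^ b := by
  have : (a ^^^ c) ^^^ (b ^^^ c) = (a ^^^ b) ^^^ (c ^^^ c) := by ac_rfl
  rw [this, Nat.xor_self, Nat.xor_zero]

theorem mask_sub (n : Nat) : ∀ m, m < 2 ^ n → (2 ^ n - 1) ^^^ m = (2 ^ n - 1) - m := by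
  induction n with
  | zero =>
      intro m hm
      have : m = 0 := by omega
      simp [this]
  | succ n ih =>
      intro m hm
      have hpos : 0 < 2 ^ n := Nat.two_pow_pos n
      have hsum : 2 ^ n + 2 ^ n = 2 ^ (n + 1) := by ring
      have hmask : 2 ^ (n + 1) - 1 = (2 ^ n - 1) ^^^ 2 ^ n := by
        rw [xor_two_pow_of_lt (2 ^ n - 1) n (by omega)]
        omega
      by_cases hc : m < 2 ^ n
      · rw [hmask, xor_shuffle, ih m hc,
          xor_two_pow_of_lt ((2 ^ n - 1) - m) n (by omega)]
        omega
      · have hr : m - 2 ^ n < 2 ^ n := by omega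
        have hm2 : m = (m - 2 ^ n) ^^^ 2 ^ n := by
          rw [xor_two_pow_of_lt _ n hr]; omega
        rw [hmask, hm2, xor_cancel, ih _ hr]
        omega

-- the key map and the Int bridge
theorem pkey_of_nonneg (x : Int) (h : 0 ≤ x) : pkey x = x.toNat &&& (2 ^ 33 - 1) := by
  simp only [pkey, PySem.Int.band, h, if_true,
    show ((0 : Int) ≤ 8589934591) = True from by simp]
  rw [show Int.toNat 8589934591 = 2 ^ 33 - 1 from rfl]
  simp

theorem pkey_nonneg_small (x : Int) (h0 : 0 ≤ x) (h1 : x ≤ 2147483648) : pkey x = x.toNat := by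
  rw [pkey_of_nonneg x h0, Nat.and_two_pow_sub_one_eq_mod]
  exact Nat.mod_eq_of_lt (by omega)

theorem pkey_neg (x : Int) (h0 : x < 0) (h1 : -2147483648 ≤ x) :
    pkey x = (2 ^ 33 - 1) ^^^ (-x - 1).toNat := by
  have hns : ¬ (0 ≤ x) := by omega
  have hm : (-x - 1).toNat < 2 ^ 33 := by omega
  simp only [pkey, PySem.Int.band, hns, if_false, if_true,
    show ((0 : Int) ≤ 8589934591) = True from by simp]
  rw [Int.toNat_natCast, show Int.toNat 8589934591 = 2 ^ 33 - 1 from rfl]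
  rw [mask_sub 33 _ hm]
  have hand : (2 ^ 33 - 1) &&& (-x - 1).toNat = (-x - 1).toNat := by
    rw [Nat.land_comm, Nat.and_two_pow_sub_one_eq_mod]
    exact Nat.mod_eq_of_lt hm
  omega

theorem pkey_lt (x : Int) (h1 : -2147483648 ≤ x) (h2 : x ≤ 2147483648) : pkey x < 2 ^ 33 := by
  by_cases h : 0 ≤ x
  · rw [pkey_nonneg_small x h h2]; omega
  · rw [pkey_neg x (by omega) h1]
    exact Nat.xor_lt_two_pow (by omega) (by omega)

theorem pair_bridge (v x : Int) (hv : -2147483648 ≤ v ∧ v ≤ 2147483648)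
    (hx : -2147483648 ≤ x ∧ x ≤ 2147483648) :
    (((pkey v ^^^ 4294967296) ^^^ pkey x : Nat) : Int) = PySem.Int.bxor v x + 4294967296 := by
  have hOm : ((2 : Nat) ^ 32) ^^^ (2 ^ 33 - 1) = 2 ^ 32 - 1 := by
    rw [Nat.xor_comm, mask_sub 33 (2 ^ 32) (by norm_num)]
    norm_num
  rw [show (4294967296 : Nat) = 2 ^ 32 from by norm_num]
  by_cases hv0 : 0 ≤ v <;> by_cases hx0 : 0 ≤ x
  · -- both nonnegative
    rw [pkey_nonneg_small v hv0 hv.2, pkey_nonneg_small x hx0 hx.2]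
    have hw : v.toNat ^^^ x.toNat < 2 ^ 32 :=
      Nat.xor_lt_two_pow (by omega) (by omega)
    rw [xor_shuffle, xor_two_pow_of_lt _ 32 hw]
    simp only [PySem.Int.bxor, hv0, hx0, if_true]
    push_cast
    ring
  · -- v ≥ 0, x < 0
    rw [pkey_nonneg_small v hv0 hv.2, pkey_neg x (by omega) hx.1]
    have hw : v.toNat ^^^ (-x - 1).toNat < 2 ^ 32 :=
      Nat.xor_lt_two_pow (by omega) (by omega)
    have hsh : (v.toNat ^^^ 2 ^ 32) ^^^ ((2 ^ 33 - 1) ^^^ (-x - 1).toNat)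
        = (2 ^ 32 - 1) ^^^ (v.toNat ^^^ (-x - 1).toNat) := by
      rw [← hOm]; ac_rfl
    rw [hsh, mask_sub 32 _ hw]
    simp only [PySem.Int.bxor, hv0, hx0, if_true, if_false]
    have hc : ((2 ^ 32 - 1 - (v.toNat ^^^ (-x - 1).toNat) : Nat) : Int)
        = 2 ^ 32 - 1 - ((v.toNat ^^^ (-x - 1).toNat : Nat) : Int) := by
      rw [Nat.cast_sub (by omega : (v.toNat ^^^ (-x - 1).toNat) ≤ 2 ^ 32 - 1)]
      push_cast
      ring
    rw [hc]
    push_cast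
    ring
  · -- v < 0, x ≥ 0
    rw [pkey_neg v (by omega) hv.1, pkey_nonneg_small x hx0 hx.2]
    have hw : (-v - 1).toNat ^^^ x.toNat < 2 ^ 32 :=
      Nat.xor_lt_two_pow (by omega) (by omega)
    have hsh : (((2 ^ 33 - 1) ^^^ (-v - 1).toNat) ^^^ 2 ^ 32) ^^^ x.toNat
        = (2 ^ 32 - 1) ^^^ ((-v - 1).toNat ^^^ x.toNat) := by
      rw [← hOm]; ac_rfl
    rw [hsh, mask_sub 32 _ hw]
    simp only [PySem.Int.bxor, hv0, hx0, if_true, if_false]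
    have hc : ((2 ^ 32 - 1 - ((-v - 1).toNat ^^^ x.toNat) : Nat) : Int)
        = 2 ^ 32 - 1 - (((-v - 1).toNat ^^^ x.toNat : Nat) : Int) := by
      rw [Nat.cast_sub (by omega : ((-v - 1).toNat ^^^ x.toNat) ≤ 2 ^ 32 - 1)]
      push_cast
      ring
    rw [hc]
    push_cast
    ring
  · -- both negative
    rw [pkey_neg v (by omega) hv.1, pkey_neg x (by omega) hx.1]
    have hw : (-v - 1).toNat ^^^ (-x - 1).toNat < 2 ^ 32 :=
      Nat.xor_lt_two_pow (by omega) (by omega)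
    have hsh : (((2 ^ 33 - 1) ^^^ (-v - 1).toNat) ^^^ 2 ^ 32) ^^^ ((2 ^ 33 - 1) ^^^ (-x - 1).toNat)
        = ((-v - 1).toNat ^^^ (-x - 1).toNat) ^^^ 2 ^ 32 := by
      have : (((2 ^ 33 - 1) ^^^ (-v - 1).toNat) ^^^ 2 ^ 32) ^^^ ((2 ^ 33 - 1) ^^^ (-x - 1).toNat)
          = (((-v - 1).toNat ^^^ (-x - 1).toNat) ^^^ 2 ^ 32) ^^^ ((2 ^ 33 - 1) ^^^ (2 ^ 33 - 1)) := by
        ac_rfl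
      rw [this, Nat.xor_self, Nat.xor_zero]
    rw [hsh, xor_two_pow_of_lt _ 32 hw]
    simp only [PySem.Int.bxor, hv0, hx0, if_false]
    push_cast
    ring

-- per-element query result = max of xors over the stored list
theorem tquery_le (top : List Int) (v x : Int)
    (hv : -2147483648 ≤ v ∧ v ≤ 2147483648)
    (hx : -2147483648 ≤ x ∧ x ≤ 2147483648) (hmem : x ∈ top) :
    PySem.Int.bxor v x ≤ tquery (buildTrie top) v := by
  have hq : pkey v ^^^ 4294967296 < 2 ^ 33 :=
    Nat.xor_lt_two_pow (pkey_lt v hv.1 hv.2) (by norm_num)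
  have hk : pkey x < 2 ^ 33 := pkey_lt x hx.1 hx.2
  have hmem : memAux (buildTrie top) (pkey x) 33 :=
    (memAux_buildTrie top (pkey x)).2 ⟨x, hmem, fun j _ => rfl⟩
  have hle : xv 33 (pkey v ^^^ 4294967296) (pkey x) ≤ queryAux (buildTrie top) (pkey v ^^^ 4294967296) 33 :=
    queryAux_opt 33 _ _ _ (wf_buildTrie top) hmem
  rw [xv_eq_xor 33 _ _ hq hk] at hle
  have hcast : ((((pkey v ^^^ 4294967296) ^^^ pkey x : Nat)) : Int)
      ≤ ((queryAux (buildTrie top) (pkey v ^^^ 4294967296) 33 : Nat) : Int) := by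
    exact_mod_cast hle
  rw [pair_bridge v x hv hx] at hcast
  unfold tquery
  omega

theorem tquery_achieved (top : List Int) (v : Int)
    (hv : -2147483648 ≤ v ∧ v ≤ 2147483648)
    (htop : ∀ x ∈ top, -2147483648 ≤ x ∧ x ≤ 2147483648) (hne : top ≠ []) :
    ∃ x ∈ top, tquery (buildTrie top) v = PySem.Int.bxor v x := by
  have hq : pkey v ^^^ 4294967296 < 2 ^ 33 :=
    Nat.xor_lt_two_pow (pkey_lt v hv.1 hv.2) (by norm_num)
  obtain ⟨w, hm, he⟩ :=
    queryAux_achieved 33 (buildTrie top) (pkey v ^^^ 4294967296) (wf_buildTrie top)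
      (buildTrie_isNode top hne)
  obtain ⟨x, hxt, heq⟩ := (memAux_buildTrie top w).1 hm
  refine ⟨x, hxt, ?_⟩
  have hk : pkey x < 2 ^ 33 := pkey_lt x (htop x hxt).1 (htop x hxt).2
  rw [← xv_congr 33 (pkey v ^^^ 4294967296) (pkey x) w heq] at he
  rw [xv_eq_xor 33 _ _ hq hk] at he
  unfold tquery
  rw [he, pair_bridge v x hv (htop x hxt)]
  ring

-- fold-max lemmas
theorem foldl_max_le {α : Type} (l : List α) (f : α → Int) (m acc : Int)
    (h : ∀ x ∈ l, f x ≤ m) :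
    l.foldl (fun a x => max a (f x)) acc ≤ max acc m := by
  induction l generalizing acc with
  | nil => exact le_max_left acc m
  | cons x xs ih =>
      simp only [List.foldl_cons]
      refine le_trans (ih (max acc (f x)) (fun y hy => h y (List.mem_cons_of_mem x hy))) ?_
      apply max_le _ (le_max_right acc m)
      exact max_le (le_max_left acc m)
        (le_trans (h x (List.mem_cons_self)) (le_max_right acc m))

theorem foldl_max_eq {α : Type} (l : List α) (f : α → Int) (m acc : Int)
    (h : ∀ x ∈ l, f x ≤ m) (hx : ∃ x ∈ l, f x = m) :
    l.foldl (fun a x => max a (f x)) acc = max acc m := by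
  refine le_antisymm (foldl_max_le l f m acc h) (max_le ?_ ?_)
  · exact (PySem.List.le_foldl_max_int l f acc).1
  · obtain ⟨x, hx, rfl⟩ := hx
    exact (PySem.List.le_foldl_max_int l f acc).2 x hx

theorem foldl_max_hoist {α : Type} (l : List α) (f : α → Int) (c acc : Int) :
    l.foldl (fun a x => max a (f x)) (max c acc) = max c (l.foldl (fun a x => max a (f x)) acc) := by
  induction l generalizing acc with
  | nil => rfl
  | cons x xs ih =>
      simp only [List.foldl_cons, max_assoc]
      exact ih (max acc (f x))

theorem foldl_const {α β : Type} (l : List α) (c : β) : l.foldl (fun a _ => a) c = c := by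
  induction l with
  | nil => rfl
  | cons x xs ih => exact ih

-- ===== VERDICT (by name: the statement is the Claim_ definition above) =====
theorem solve_spec : Claim_equal_solve := by
  intro A B hDom
  simp only [Dom_solve, Bool.and_eq_true, List.all_eq_true, pvDomInt, decide_eq_true_eq] at hDom
  obtain ⟨hAd, hBd⟩ := hDom
  show solve A B = solve_alt A B
  simp only [solve, solve_alt]
  set tA := PySem.List.slice (PySem.List.sorted A fun x => x) (some (-100)) none with htA
  set tB := PySem.List.slice (PySem.List.sorted B fun x => x) (some (-100)) none with htB
  have htAd : ∀ x ∈ tA, -2147483648 ≤ x ∧ x ≤ 2147483648 := fun x hx =>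
    hAd x ((PySem.List.mem_sorted A _ false x).1 (PySem.List.mem_of_mem_slice _ _ _ hx))
  have htBd : ∀ x ∈ tB, -2147483648 ≤ x ∧ x ≤ 2147483648 := fun x hx =>
    hBd x ((PySem.List.mem_sorted B _ false x).1 (PySem.List.mem_of_mem_slice _ _ _ hx))
  have hiffA : tA = [] ↔ A = [] := by
    rw [htA, PySem.List.slice_from_neg_ofNat _ 100 (by norm_num), List.drop_eq_nil_iff,
      PySem.List.length_sorted]
    constructor
    · intro h
      exact List.eq_nil_of_length_eq_zero (by omega)
    · intro h
      subst h; simp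
  have hiffB : tB = [] ↔ B = [] := by
    rw [htB, PySem.List.slice_from_neg_ofNat _ 100 (by norm_num), List.drop_eq_nil_iff,
      PySem.List.length_sorted]
    constructor
    · intro h
      exact List.eq_nil_of_length_eq_zero (by omega)
    · intro h
      subst h; simp
  by_cases hB : tB = []
  · -- B is empty: both sides are 0
    have hBnil : B = [] := hiffB.1 hB
    rw [hB, hBnil]
    simp only [List.foldl_nil, List.isEmpty_nil, if_true, foldl_const]
    split <;> simp
  · -- the B-side trie is queried
    have hBne : B ≠ [] := fun h => hB (hiffB.2 h)
    have hQB : A.foldl (fun big v => tB.foldl (fun big mb => max big (PySem.Int.bxor v mb)) big) 0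
        = A.foldl (fun big v => max big (tquery (buildTrie tB) v)) 0 := by
      apply PySem.List.foldl_congr_mem
      intro acc v hv
      exact foldl_max_eq tB (fun mb => PySem.Int.bxor v mb) _ acc
        (fun x hx => tquery_le tB v x (hAd v hv) (htBd x hx) hx)
        (by obtain ⟨x, hx, he⟩ := tquery_achieved tB v (hAd v hv) htBd hB
            exact ⟨x, hx, he.symm⟩)
    have hBne' : tB.isEmpty = false := by
      rw [List.isEmpty_eq_false_iff]; exact hB
    rw [hQB, hBne']
    simp only [Bool.false_eq_true, if_false]
    by_cases hA : tA = []
    · -- A is empty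
      have hAnil : A = [] := hiffA.1 hA
      rw [hA, hAnil]
      simp only [List.foldl_nil, List.isEmpty_nil, if_true, foldl_const]
      simp
    · have hAne' : tA.isEmpty = false := by
        rw [List.isEmpty_eq_false_iff]; exact hA
      have hQA : B.foldl (fun big v => tA.foldl (fun big ma => max big (PySem.Int.bxor v ma)) big) 0
          = B.foldl (fun big v => max big (tquery (buildTrie tA) v)) 0 := by
        apply PySem.List.foldl_congr_mem
        intro acc v hv
        exact foldl_max_eq tA (fun ma => PySem.Int.bxor v ma) _ acc
          (fun x hx => tquery_le tA v x (hBd v hv) (htAd x hx) hx)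
          (by obtain ⟨x, hx, he⟩ := tquery_achieved tA v (hBd v hv) htAd hA
              exact ⟨x, hx, he.symm⟩)
      rw [hQA, hAne']
      simp only [Bool.false_eq_true, if_false]
      set c := A.foldl (fun big v => max big (tquery (buildTrie tB) v)) 0 with hc
      have hc0 : 0 ≤ c := (PySem.List.le_foldl_max_int A _ 0).1
      have : c = max c 0 := (max_eq_left hc0).symm
      rw [this]
      rw [foldl_max_hoist B (fun v => tquery (buildTrie tA) v) c 0]
      rw [← this]
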